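-- pv_equiv track=rewrite | github.com/fenjaWagner/TTBMMT | f_mapping.py | create_single_dict
-- ===== SOURCE A (Python) =====
-- def create_single_dict(term_set, other_term_set, output_set):
--     single_set = set()
--     contract_set = set()
--     for i in term_set:
--         if i not in output_set:
--             if i not in other_term_set:
--                 single_set.add(i)
--             else:
--                 contract_set.add(i)
--     return single_set, contract_set
-- ===== SOURCE B (Python) =====
-- def create_single_dict(term_set, other_term_set, output_set):
--     # Build a classification index once, then split it: no per-element scans of
--     # other_term_set/output_set inside the term_set loop.
--     label = {}
--     for i in term_set:
--         label[i] = 0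
--     for i in other_term_set:
--         if i in label:
--             label[i] = 1
--     for i in output_set:
--         label.pop(i, None)
--     single_set = set()
--     contract_set = set()
--     for i, tag in label.items():
--         if tag == 0:
--             single_set.add(i)
--         else:
--             contract_set.add(i)
--     return single_set, contract_set
-- ===== Notes on version B (the rewrite author's own statement) =====
-- stated objective: alternative
-- what changed: Instead of one loop over term_set with nested membership scans of output_set and other_term_set, B builds a classification dict in three staged passes (label every term_set element 0, relabel present other_term_set members 1, erase output_set keys) and then splits the dict's items by label, so the inner per-element scans disappear.
import Mathlib
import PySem

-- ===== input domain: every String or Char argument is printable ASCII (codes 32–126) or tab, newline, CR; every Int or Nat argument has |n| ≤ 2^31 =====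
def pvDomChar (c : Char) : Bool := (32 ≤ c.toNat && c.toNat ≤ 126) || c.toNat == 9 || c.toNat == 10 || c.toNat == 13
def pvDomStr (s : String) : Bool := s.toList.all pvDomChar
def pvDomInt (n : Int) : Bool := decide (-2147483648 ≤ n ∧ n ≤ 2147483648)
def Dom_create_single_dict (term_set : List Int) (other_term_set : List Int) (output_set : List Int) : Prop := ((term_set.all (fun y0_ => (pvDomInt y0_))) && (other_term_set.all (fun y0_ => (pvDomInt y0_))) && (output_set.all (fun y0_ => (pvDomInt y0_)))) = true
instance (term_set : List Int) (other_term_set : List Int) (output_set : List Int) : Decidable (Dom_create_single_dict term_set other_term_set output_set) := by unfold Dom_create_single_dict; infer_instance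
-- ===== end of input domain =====

-- B replaces A's single loop with nested membership scans by a classification dict built in
-- three staged passes (label term_set 0, relabel other_term_set members 1, erase output_set),
-- then splits the dict's items; objective: alternative decomposition (hash index, no inner scans).
-- ===== PORT A =====
def create_single_dict (term_set : List Int) (other_term_set : List Int) (output_set : List Int) : List Int × List Int :=
  term_set.foldl (fun (acc : PySem.Set Int × PySem.Set Int) i =>
    if !(output_set.contains i) then
      if !(other_term_set.contains i) then (PySem.Set.add acc.1 i, acc.2)
      else (acc.1, PySem.Set.add acc.2 i)
    else acc) (PySem.Set.empty, PySem.Set.empty)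

-- ===== PORT B =====
def create_single_dict_alt (term_set : List Int) (other_term_set : List Int) (output_set : List Int) : List Int × List Int :=
  let label1 := term_set.foldl (fun (d : PySem.Dict Int Int) i => d.insert i 0) PySem.Dict.empty
  let label2 := other_term_set.foldl (fun d i => if d.contains i then d.insert i 1 else d) label1
  let label3 := output_set.foldl (fun d i => d.erase i) label2   -- label.pop(i, None)
  label3.items.foldl (fun (acc : PySem.Set Int × PySem.Set Int) p =>
    if p.2 == 0 then (PySem.Set.add acc.1 p.1, acc.2)
    else (acc.1, PySem.Set.add acc.2 p.1)) (PySem.Set.empty, PySem.Set.empty)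

-- ===== PRECONDITION & SPEC =====
def Spec_create_single_dict (term_set : List Int) (other_term_set : List Int) (output_set : List Int) (out : List Int × List Int) : Prop := out = create_single_dict_alt term_set other_term_set output_set
instance (term_set : List Int) (other_term_set : List Int) (output_set : List Int) (out : List Int × List Int) : Decidable (Spec_create_single_dict term_set other_term_set output_set out) := by unfold Spec_create_single_dict; infer_instance

-- ===== CLAIM (what is proved, stated in full; the proofs are below) =====
def Claim_equal_create_single_dict : Prop := ∀ (term_set : List Int) (other_term_set : List Int) (output_set : List Int), Dom_create_single_dict term_set other_term_set output_set → Spec_create_single_dict term_set other_term_set output_set (create_single_dict term_set other_term_set output_set)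

-- ===== LEMMAS AND PROOFS =====

-- A's loop body splits into two independent Set.add folds over filtered inputs
theorem loop_split (os ots : List Int) : ∀ (xs : List Int) (s c : PySem.Set Int),
    xs.foldl (fun (acc : PySem.Set Int × PySem.Set Int) i =>
      if !(os.contains i) then
        if !(ots.contains i) then (PySem.Set.add acc.1 i, acc.2)
        else (acc.1, PySem.Set.add acc.2 i)
      else acc) (s, c)
    = ((xs.filter (fun i => !(os.contains i) && !(ots.contains i))).foldl PySem.Set.add s,
       (xs.filter (fun i => !(os.contains i) && ots.contains i)).foldl PySem.Set.add c) := by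
  intro xs
  induction xs with
  | nil => intro s c; simp
  | cons x xs ih =>
    intro s c
    by_cases ho : os.contains x = true <;> by_cases ht : ots.contains x = true <;>
      simp only [List.foldl_cons, List.filter_cons, ho, ht, Bool.not_true, Bool.not_false,
        Bool.and_false, Bool.and_true, Bool.false_eq_true, if_true, if_false] <;>
      exact ih _ _

theorem contains_filter {p : Int → Bool} {x : Int} (s : List Int) (hx : p x = true) :
    (s.filter p).contains x = s.contains x := by
  simp [List.mem_filter, hx]

-- folding Set.add over a filtered list is filtering the folded set
theorem fold_add_filter (p : Int → Bool) : ∀ (xs : List Int) (s : PySem.Set Int),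
    (xs.filter p).foldl PySem.Set.add (s.filter p) = (xs.foldl PySem.Set.add s).filter p := by
  intro xs
  induction xs with
  | nil => intro s; simp
  | cons x xs ih =>
    intro s
    by_cases hp : p x = true
    · rw [List.filter_cons_of_pos hp, List.foldl_cons, List.foldl_cons, ← ih]
      have hadd : PySem.Set.add (s.filter p) x = (PySem.Set.add s x).filter p := by
        simp only [PySem.Set.add, PySem.Set.contains, contains_filter s hp]
        split_ifs with h
        · rfl
        · simp [List.filter_append, hp]
      rw [hadd]
    · rw [List.filter_cons_of_neg (by simpa using hp), List.foldl_cons, ← ih]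
      have hadd : (PySem.Set.add s x).filter p = s.filter p := by
        simp only [PySem.Set.add]
        split_ifs with h
        · rfl
        · simp [List.filter_append, Bool.eq_false_iff.mpr hp]
      rw [hadd]

-- A's result, in closed form: two filters of set(term_set)
theorem a_characterization (ts ots os : List Int) :
    create_single_dict ts ots os
      = ((PySem.Set.ofList ts).filter (fun i => !(os.contains i) && !(ots.contains i)),
         (PySem.Set.ofList ts).filter (fun i => !(os.contains i) && ots.contains i)) := by
  unfold create_single_dict
  rw [loop_split]
  have h1 : ∀ p : Int → Bool,
      (ts.filter p).foldl PySem.Set.add PySem.Set.empty = (PySem.Set.ofList ts).filter p := by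
    intro p
    have := fold_add_filter p ts []
    simpa [PySem.Set.ofList, PySem.Set.empty] using this
  rw [h1, h1]

theorem pass1_getD (ts : List Int) : ∀ (d : PySem.Dict Int Int),
    (∀ k, d.getD k 0 = 0) → ∀ k, ((ts.foldl (fun d i => d.insert i 0) d).getD k 0) = 0 := by
  induction ts with
  | nil => intro d h k; exact h k
  | cons a ts ih =>
    intro d h k
    simp only [List.foldl_cons]
    refine ih _ (fun k' => ?_) k
    rw [PySem.Dict.getD_insert]
    split_ifs with hk
    · rfl
    · exact h k'

theorem pass1_keys (ts : List Int) :
    (ts.foldl (fun (d : PySem.Dict Int Int) i => d.insert i 0) PySem.Dict.empty).keys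
      = PySem.Set.ofList ts := by
  rw [PySem.Dict.keys_foldl_insert]
  rfl

theorem pass2_keys (ots : List Int) : ∀ (d : PySem.Dict Int Int),
    ((ots.foldl (fun d i => if d.contains i then d.insert i 1 else d) d)).keys = d.keys := by
  induction ots with
  | nil => intro d; rfl
  | cons a ots ih =>
    intro d
    simp only [List.foldl_cons]
    by_cases h : d.contains a = true
    · rw [if_pos h, ih, PySem.Dict.keys_insert_of_contains d 1 h]
    · rw [if_neg h, ih]

theorem pass2_getD (ots : List Int) : ∀ (d : PySem.Dict Int Int) (k : Int),
    ((ots.foldl (fun d i => if d.contains i then d.insert i 1 else d) d)).getD k 0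
      = if d.contains k = true ∧ k ∈ ots then 1 else d.getD k 0 := by
  induction ots with
  | nil => intro d k; simp
  | cons a ots ih =>
    intro d k
    simp only [List.foldl_cons, List.mem_cons]
    by_cases h : d.contains a = true
    · rw [if_pos h, ih, PySem.Dict.contains_insert d a k 1, PySem.Dict.getD_insert]
      by_cases hk : k = a
      · subst hk; simp [h]
      · simp [hk]
    · rw [if_neg h, ih]
      by_cases hk : k = a
      · subst hk; simp [h]
      · simp [hk]

theorem erase_items (d : PySem.Dict Int Int) (k : Int) :
    (d.erase k).items = d.items.filter (fun p => !(p.1 == k)) := by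
  simp [PySem.Dict.erase]

theorem pass3_items (os : List Int) : ∀ (d : PySem.Dict Int Int),
    ((os.foldl (fun d i => d.erase i) d)).items
      = d.items.filter (fun p => !(os.contains p.1)) := by
  induction os with
  | nil => intro d; simp
  | cons a os ih =>
    intro d
    simp only [List.foldl_cons]
    rw [ih, erase_items, List.filter_filter]
    apply List.filter_congr
    intro p _
    simp only [List.contains_cons, Bool.not_or]
    rw [Bool.and_comm]

theorem pair_split : ∀ (ps : List (Int × Int)) (s c : PySem.Set Int),
    ps.foldl (fun (acc : PySem.Set Int × PySem.Set Int) p =>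
      if p.2 == 0 then (PySem.Set.add acc.1 p.1, acc.2)
      else (acc.1, PySem.Set.add acc.2 p.1)) (s, c)
    = ((ps.filter (fun p => p.2 == 0)).foldl (fun s p => PySem.Set.add s p.1) s,
       (ps.filter (fun p => !(p.2 == 0))).foldl (fun s p => PySem.Set.add s p.1) c) := by
  intro ps
  induction ps with
  | nil => intro s c; simp
  | cons p ps ih =>
    intro s c
    by_cases h : (p.2 == 0) = true <;>
      simp only [List.foldl_cons, List.filter_cons, h, Bool.not_true, Bool.not_false,
        Bool.false_eq_true, if_true, if_false] <;> exact ih _ _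

theorem fold_add_nodup' : ∀ (xs : List Int) (s : List Int), xs.Nodup → (∀ x ∈ xs, x ∉ s) → xs.foldl PySem.Set.add s = s ++ xs := by
  intro xs
  induction xs with
  | nil => intro s _ _; simp
  | cons x xs ih =>
    intro s hnd hdisj
    simp only [List.foldl_cons]
    have hx : PySem.Set.add s x = s ++ [x] := by
      simp [PySem.Set.add, PySem.Set.contains, hdisj x (by simp)]
    rw [hx, ih (s ++ [x]) hnd.of_cons]
    · simp
    · intro y hy
      simp only [List.mem_append, List.mem_singleton]
      rintro (h | rfl)
      · exact hdisj y (by simp [hy]) h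
      · exact (List.nodup_cons.mp hnd).1 hy

theorem alt_characterization (ts ots os : List Int) :
  (let label1 := ts.foldl (fun (d : PySem.Dict Int Int) i => d.insert i 0) PySem.Dict.empty
   let label2 := ots.foldl (fun d i => if d.contains i then d.insert i 1 else d) label1
   let label3 := os.foldl (fun d i => d.erase i) label2
   label3.items.foldl (fun (acc : PySem.Set Int × PySem.Set Int) p =>
     if p.2 == 0 then (PySem.Set.add acc.1 p.1, acc.2)
     else (acc.1, PySem.Set.add acc.2 p.1)) (PySem.Set.empty, PySem.Set.empty))
  = ((PySem.Set.ofList ts).filter (fun i => !(os.contains i) && !(ots.contains i)),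
     (PySem.Set.ofList ts).filter (fun i => !(os.contains i) && ots.contains i)) := by
  set l1 := ts.foldl (fun (d : PySem.Dict Int Int) i => d.insert i 0) PySem.Dict.empty with hl1
  have hk1 : l1.keys = PySem.Set.ofList ts := pass1_keys ts
  have hnd1 : l1.keys.Nodup := by rw [hk1]; exact PySem.Set.nodup_ofList ts
  set l2 := ots.foldl (fun d i => if d.contains i then d.insert i 1 else d) l1 with hl2
  have hk2 : l2.keys = PySem.Set.ofList ts := by rw [hl2, pass2_keys, hk1]
  have hnd2 : l2.keys.Nodup := by rw [hk2]; exact PySem.Set.nodup_ofList ts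
  -- value of l2 at a key k of ts: 1 if k ∈ ots else 0
  have hval : ∀ k ∈ PySem.Set.ofList ts, l2.getD k 0 = if k ∈ ots then 1 else 0 := by
    intro k hk
    rw [hl2, pass2_getD]
    have hc : l1.contains k = true := by
      rw [PySem.Dict.contains_eq_decide_mem_keys, hk1]
      simpa using hk
    have hg : l1.getD k 0 = 0 := pass1_getD ts PySem.Dict.empty (fun _ => rfl) k
    by_cases hm : k ∈ ots
    · simp [hc, hm]
    · simp [hm, hg]
  -- items of l2
  have hitems2 : l2.items = (PySem.Set.ofList ts).map (fun k => (k, if k ∈ ots then (1:Int) else 0)) := by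
    rw [PySem.Dict.items_eq_map_keys l2 hnd2 0, hk2]
    exact List.map_congr_left (fun k hk => by rw [hval k hk])
  -- items after erasing
  have hitems3 : (os.foldl (fun d i => d.erase i) l2).items
      = ((PySem.Set.ofList ts).filter (fun k => !(os.contains k))).map
          (fun k => (k, if k ∈ ots then (1:Int) else 0)) := by
    rw [pass3_items, hitems2, List.filter_map]
    rfl
  simp only []
  rw [hitems3, pair_split, List.filter_map, List.filter_map, List.foldl_map, List.foldl_map,
    List.filter_filter, List.filter_filter]
  have hnd : ∀ p : Int → Bool, ((PySem.Set.ofList ts).filter p).Nodup :=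
    fun p => (PySem.Set.nodup_ofList ts).filter p
  simp only [Function.comp_def]
  refine congrArg₂ Prod.mk ?_ ?_
  · have hfe : List.filter (fun a => (((a, if a ∈ ots then (1:Int) else 0).2 == 0)) && !os.contains a) (PySem.Set.ofList ts)
        = List.filter (fun i => !os.contains i && !ots.contains i) (PySem.Set.ofList ts) := by
      apply List.filter_congr
      intro k _
      by_cases hm : k ∈ ots <;> simp [hm, Bool.and_comm]
    rw [hfe]
    have := fold_add_nodup' (List.filter (fun i => !os.contains i && !ots.contains i) (PySem.Set.ofList ts)) [] (hnd _) (by simp)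
    simpa using this
  · have hfe : List.filter (fun a => (!((a, if a ∈ ots then (1:Int) else 0).2 == 0)) && !os.contains a) (PySem.Set.ofList ts)
        = List.filter (fun i => !os.contains i && ots.contains i) (PySem.Set.ofList ts) := by
      apply List.filter_congr
      intro k _
      by_cases hm : k ∈ ots <;> simp [hm, Bool.and_comm]
    rw [hfe]
    have := fold_add_nodup' (List.filter (fun i => !os.contains i && ots.contains i) (PySem.Set.ofList ts)) [] (hnd _) (by simp)
    simpa using this


theorem create_single_dict_spec : Claim_equal_create_single_dict := by
  intro ts ots os _
  unfold Spec_create_single_dict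
  rw [a_characterization]
  exact (alt_characterization ts ots os).symm
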